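-- pv_equiv track=rewrite | github.com/fivecoco/semi-auto-image-annotation-tool | SLUtil.py | convert_rules
-- ===== SOURCE A (Python) =====
-- def convert_rules(rules):
--     ret_rules = []
--     for rule in rules:
--         ret = rule.replace('.', '\\.')
--         ret = ret.replace('*', '.*')
--         ret = "%s" % ret
--         ret_rules.append(ret)
--
--     return ret_rules
-- ===== SOURCE B (Python) =====
-- def convert_rules(rules):
--     return [''.join('\\.' if c == '.' else '.*' if c == '*' else c for c in rule)
--             for rule in rules]
-- ===== Notes on version B (the rewrite author's own statement) =====
-- stated objective: simpler
-- what changed: Replaces the two sequential full-string str.replace passes with one left-to-right character-level pass that emits each character's escaped form directly, built as a single list comprehension.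
import Mathlib
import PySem

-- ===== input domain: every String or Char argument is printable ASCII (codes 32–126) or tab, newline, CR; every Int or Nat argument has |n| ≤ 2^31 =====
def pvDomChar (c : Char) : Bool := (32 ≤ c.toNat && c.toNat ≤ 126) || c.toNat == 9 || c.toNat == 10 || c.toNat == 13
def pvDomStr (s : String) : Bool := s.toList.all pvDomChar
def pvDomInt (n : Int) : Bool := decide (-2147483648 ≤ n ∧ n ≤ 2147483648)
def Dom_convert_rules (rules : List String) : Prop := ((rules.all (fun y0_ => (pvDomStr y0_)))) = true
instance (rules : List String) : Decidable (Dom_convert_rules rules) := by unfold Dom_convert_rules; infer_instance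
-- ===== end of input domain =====

-- B fuses A's two sequential str.replace passes into one per-character pass (simpler, same output).


-- ===== PORT A =====
def convert_rules (rules : List String) : List String :=
  rules.foldl (fun ret_rules rule =>
    let ret := PySem.Str.replace rule "." "\\."
    let ret := PySem.Str.replace ret "*" ".*"
    let ret := ret  -- "%s" % ret is the identity on a str
    ret_rules ++ [ret]) []

-- ===== PORT B =====
def pvEsc (c : Char) : List Char :=
  if c = '.' then ['\\', '.'] else if c = '*' then ['.', '*'] else [c]

def convert_rules_alt (rules : List String) : List String :=
  rules.map (fun rule => String.ofList (rule.toList.flatMap pvEsc))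

-- ===== PRECONDITION & SPEC =====
def Spec_convert_rules (rules : List String) (out : List String) : Prop := out = convert_rules_alt rules
instance (rules : List String) (out : List String) : Decidable (Spec_convert_rules rules out) := by unfold Spec_convert_rules; infer_instance

-- ===== CLAIM (what is proved, stated in full; the proofs are below) =====
def Claim_equal_convert_rules : Prop := ∀ (rules : List String), Dom_convert_rules rules → Spec_convert_rules rules (convert_rules rules)

-- ===== LEMMAS AND PROOFS =====

-- replace.go with a single-char pattern is a flatMap, given enough fuel
theorem pv_go_single (o : Char) (new : List Char) :
    ∀ (l acc : List Char) (fuel : Nat), l.length ≤ fuel →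
      PySem.Chars.replace.go [o] new fuel l acc
        = acc.reverse ++ l.flatMap (fun c => if c = o then new else [c]) := by
  intro l
  induction l with
  | nil =>
    intro acc fuel _
    cases fuel <;> simp [PySem.Chars.replace.go]
  | cons c t ih =>
    intro acc fuel hle
    cases fuel with
    | zero => simp at hle
    | succ f =>
      have ht : t.length ≤ f := by simpa using hle
      by_cases hc : c = o
      · subst hc
        simp [PySem.Chars.replace.go, List.isPrefixOf, ih _ f ht]
      · have hpre : [o].isPrefixOf (c :: t) = false := by
          simp [List.isPrefixOf]
          intro h; exact hc h.symm
        simp [PySem.Chars.replace.go, hpre, ih _ f ht, hc]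

theorem pv_replace_single (s : List Char) (o : Char) (new : List Char) :
    PySem.Chars.replace s [o] new = s.flatMap (fun c => if c = o then new else [c]) := by
  simpa [PySem.Chars.replace] using pv_go_single o new s [] s.length le_rfl

-- the two sequential single-char replaces equal the fused per-character pass
theorem pv_fused (s : List Char) :
    PySem.Chars.replace (PySem.Chars.replace s ['.'] ['\\', '.']) ['*'] ['.', '*']
      = s.flatMap pvEsc := by
  rw [pv_replace_single, pv_replace_single, List.flatMap_assoc]
  apply List.flatMap_congr
  intro c _
  by_cases h1 : c = '.'
  · subst h1; simp [pvEsc]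
  · by_cases h2 : c = '*'
    · subst h2; simp [pvEsc]
    · simp [pvEsc, h1, h2]

theorem pv_per_rule (rule : String) :
    PySem.Str.replace (PySem.Str.replace rule "." "\\.") "*" ".*"
      = String.ofList (rule.toList.flatMap pvEsc) := by
  simp [PySem.Str.replace]
  rw [pv_fused]

theorem pv_foldl_map (rules : List String) (acc : List String) :
    rules.foldl (fun ret_rules rule =>
      ret_rules ++ [PySem.Str.replace (PySem.Str.replace rule "." "\\.") "*" ".*"]) acc
      = acc ++ rules.map (fun rule => String.ofList (rule.toList.flatMap pvEsc)) := by
  induction rules generalizing acc with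
  | nil => simp
  | cons r rs ih =>
    rw [List.foldl_cons, ih]
    simp [pv_per_rule]

-- ===== VERDICT (by name: the statement is the Claim_ definition above) =====
theorem convert_rules_spec : Claim_equal_convert_rules := by
  intro rules _
  unfold Spec_convert_rules convert_rules convert_rules_alt
  simpa using pv_foldl_map rules []
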